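-- pv_equiv track=rewrite | github.com/danthb/100-days-of-code-python | roman_digits.py | giveDigit
-- ===== SOURCE A (Python) =====
-- def giveDigit(position, digit):
--     aux = ''
--     roman_array = [['I', 'V'], ['X', 'L'], ['C', 'D'], ['M', None]]
--     if (digit == '1' or digit == '2' or digit == '3'):
--         for i in range(int(digit)):
--             aux = aux + roman_array[position][0]
--     elif(digit == '4'):
--         aux = roman_array[position][0] + roman_array[position][1]
--     elif(digit == '5'):
--         aux = roman_array[position][1]
--     elif (digit == '6' or digit == '7' or digit == '8'):
--         aux = roman_array[position][1]
--         for i in range(int(digit) - 5):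
--             aux = aux + roman_array[position][0]
--     elif(digit == '9'):
--         aux = roman_array[position][0] + roman_array[position+1][0]
--     return aux
-- ===== SOURCE B (Python) =====
-- def giveDigit(position, digit):
--     # Table-driven greedy subtractive conversion instead of a per-digit branch chain.
--     roman = [['I', 'V'], ['X', 'L'], ['C', 'D'], ['M', None]]
--     if digit not in ('1', '2', '3', '4', '5', '6', '7', '8', '9'):
--         return ''
--     n = int(digit)
--     steps = [(9, lambda: roman[position][0] + roman[position + 1][0]),
--              (5, lambda: roman[position][1]),
--              (4, lambda: roman[position][0] + roman[position][1]),
--              (1, lambda: roman[position][0])]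
--     aux = ''
--     for value, sym in steps:
--         while n >= value:
--             aux = aux + sym()
--             n = n - value
--     return aux
-- ===== Notes on version B (the rewrite author's own statement) =====
-- stated objective: alternative
-- what changed: Replaces A's nine-way per-digit branch chain (with two repetition for-loops) by a single greedy subtractive loop over a (value,symbol) table [(9,one+ten),(5,five),(4,one+five),(1,one)], with lazily-built symbols so indexing/None behaviour inside Pre_ is unchanged.
-- outside the precondition, e.g. on giveDigit(3, '5'): A returns None, B raises TypeError
import Mathlib
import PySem

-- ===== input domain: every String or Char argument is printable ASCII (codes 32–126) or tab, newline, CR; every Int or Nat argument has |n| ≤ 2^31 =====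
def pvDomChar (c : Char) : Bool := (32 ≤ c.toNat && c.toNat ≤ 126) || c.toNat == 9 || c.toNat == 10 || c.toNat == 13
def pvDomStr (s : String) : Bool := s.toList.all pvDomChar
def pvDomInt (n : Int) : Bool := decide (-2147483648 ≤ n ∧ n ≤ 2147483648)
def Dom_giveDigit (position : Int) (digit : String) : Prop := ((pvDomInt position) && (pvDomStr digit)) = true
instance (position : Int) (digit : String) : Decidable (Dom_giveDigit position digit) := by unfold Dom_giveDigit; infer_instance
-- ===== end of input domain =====

-- B replaces A's per-digit branch chain by a greedy subtractive loop over a (value,symbol) table; equivalence on Pre_ (alternative decomposition, no speed claim).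

-- ===== PORT A =====
-- roman_array as a list of pairs; the second slot of ['M', None] is `none`.
def romanArr : List (Option String × Option String) :=
  [(some "I", some "V"), (some "X", some "L"), (some "C", some "D"), (some "M", none)]

def giveDigit (position : Int) (digit : String) : String :=
  if digit = "1" ∨ digit = "2" ∨ digit = "3" then
    -- for i in range(int(digit)): aux = aux + roman_array[position][0]
    (PySem.List.pyRange 0 ((PySem.Int.ofStr? digit).getD 0) 1).foldl
      (fun aux _ => aux ++ ((PySem.List.pyGet? romanArr position).bind (·.1)).getD "") ""
  else if digit = "4" then
    ((PySem.List.pyGet? romanArr position).bind (·.1)).getD ""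
      ++ ((PySem.List.pyGet? romanArr position).bind (·.2)).getD ""
  else if digit = "5" then
    ((PySem.List.pyGet? romanArr position).bind (·.2)).getD ""
  else if digit = "6" ∨ digit = "7" ∨ digit = "8" then
    (PySem.List.pyRange 0 ((PySem.Int.ofStr? digit).getD 0 - 5) 1).foldl
      (fun aux _ => aux ++ ((PySem.List.pyGet? romanArr position).bind (·.1)).getD "")
      (((PySem.List.pyGet? romanArr position).bind (·.2)).getD "")
  else if digit = "9" then
    ((PySem.List.pyGet? romanArr position).bind (·.1)).getD ""
      ++ ((PySem.List.pyGet? romanArr (position + 1)).bind (·.1)).getD ""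
  else ""

-- ===== PORT B =====
-- `while n >= value: aux = aux + sym; n = n - value`, fuel-bounded (n ≤ 9 inside the guard).
def altWhile (v : Int) (s : String) : Nat → Int → String → Int × String
  | 0, n, aux => (n, aux)
  | fuel + 1, n, aux => if v ≤ n then altWhile v s fuel (n - v) (aux ++ s) else (n, aux)

def giveDigit_alt (position : Int) (digit : String) : String :=
  if digit = "1" ∨ digit = "2" ∨ digit = "3" ∨ digit = "4" ∨ digit = "5"
      ∨ digit = "6" ∨ digit = "7" ∨ digit = "8" ∨ digit = "9" then
    let n := (PySem.Int.ofStr? digit).getD 0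
    let one := ((PySem.List.pyGet? romanArr position).bind (·.1)).getD ""
    let five := ((PySem.List.pyGet? romanArr position).bind (·.2)).getD ""
    let ten := ((PySem.List.pyGet? romanArr (position + 1)).bind (·.1)).getD ""
    let steps : List (Int × String) := [(9, one ++ ten), (5, five), (4, one ++ five), (1, one)]
    (steps.foldl (fun p vs => altWhile vs.1 vs.2 9 p.1 p.2) (n, "")).2
  else ""

-- ===== PRECONDITION & SPEC =====
-- Pre_ excludes exactly: digits '1'..'9' with position outside Python's list-index range for the
-- accesses A makes (A raises IndexError/TypeError there), and digit '5' at position 3 or -1,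
-- where A returns None — not a string value of the declared type.
def Pre_giveDigit (position : Int) (digit : String) : Prop :=
  (digit ≠ "1" ∧ digit ≠ "2" ∧ digit ≠ "3" ∧ digit ≠ "4" ∧ digit ≠ "5"
      ∧ digit ≠ "6" ∧ digit ≠ "7" ∧ digit ≠ "8" ∧ digit ≠ "9")
  ∨ ((digit = "1" ∨ digit = "2" ∨ digit = "3") ∧ -4 ≤ position ∧ position ≤ 3)
  ∨ ((digit = "4" ∨ digit = "5" ∨ digit = "6" ∨ digit = "7" ∨ digit = "8")
      ∧ -4 ≤ position ∧ position ≤ 2 ∧ position ≠ -1)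
  ∨ (digit = "9" ∧ -4 ≤ position ∧ position ≤ 2)
instance (position : Int) (digit : String) : Decidable (Pre_giveDigit position digit) := by
  unfold Pre_giveDigit; infer_instance

def pvWitness_giveDigit : Int × String := (1, "7")

def Spec_giveDigit (position : Int) (digit : String) (out : String) : Prop := out = giveDigit_alt position digit
instance (position : Int) (digit : String) (out : String) : Decidable (Spec_giveDigit position digit out) := by unfold Spec_giveDigit; infer_instance

-- ===== CLAIM (what is proved, stated in full; the proofs are below) =====
def Claim_equal_giveDigit : Prop := ∀ (position : Int) (digit : String), Dom_giveDigit position digit → Pre_giveDigit position digit → Spec_giveDigit position digit (giveDigit position digit)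

-- ===== LEMMAS AND PROOFS =====

-- ===== VERDICT (by name: the statement is the Claim_ definition above) =====
theorem giveDigit_spec : Claim_equal_giveDigit := by
  intro position digit _hDom hPre
  unfold Spec_giveDigit
  unfold Pre_giveDigit at hPre
  rcases hPre with ⟨h1, h2, h3, h4, h5, h6, h7, h8, h9⟩ | ⟨hd, hlo, hhi⟩ | ⟨hd, hlo, hhi, _hne⟩ | ⟨hd, hlo, hhi⟩
  · simp [giveDigit, giveDigit_alt, h1, h2, h3, h4, h5, h6, h7, h8, h9]
  · rcases hd with hd | hd | hd <;> subst hd <;> interval_cases position <;> decide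
  · rcases hd with hd | hd | hd | hd | hd <;> subst hd <;> interval_cases position <;> decide
  · subst hd; interval_cases position <;> decide
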